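-- pv_equiv track=rewrite | github.com/edwardj4747/Automated-Approach-to-Dataset-Labeling | ML/keyword_sentences.py | get_last_zero_index
-- ===== SOURCE A (Python) =====
-- def get_last_zero_index(possibilities):
--     # this is inefficient but should work ok
--     last_zero_index = len(possibilities)
--     for i in range(len(possibilities) - 1, -1, -1):
--         if possibilities[i] == 0:
--             last_zero_index = i
--         else:
--             break
--     return last_zero_index
-- ===== SOURCE B (Python) =====
-- def get_last_zero_index(possibilities):
--     # single forward pass: maintain "index just past the last non-zero seen"
--     start = 0
--     for i, v in enumerate(possibilities):
--         if v != 0: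
--             start = i + 1
--     return start
-- ===== Notes on version B (the rewrite author's own statement) =====
-- stated objective: alternative
-- what changed: Replaced the reverse early-exit index scan with a single forward pass that maintains the index just past the last non-zero element seen.
import Mathlib
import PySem

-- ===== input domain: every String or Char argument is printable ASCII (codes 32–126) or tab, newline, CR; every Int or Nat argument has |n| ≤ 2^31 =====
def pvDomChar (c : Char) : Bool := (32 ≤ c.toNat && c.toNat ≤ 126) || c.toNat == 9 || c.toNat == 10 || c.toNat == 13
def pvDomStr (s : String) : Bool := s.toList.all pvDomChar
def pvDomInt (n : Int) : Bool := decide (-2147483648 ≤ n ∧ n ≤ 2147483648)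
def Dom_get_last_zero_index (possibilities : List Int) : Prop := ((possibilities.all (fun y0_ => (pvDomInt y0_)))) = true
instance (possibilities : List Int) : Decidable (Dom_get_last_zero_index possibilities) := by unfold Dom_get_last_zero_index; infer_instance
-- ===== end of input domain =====

-- B replaces A's reverse early-exit scan by a single forward pass keeping the index past the last non-zero element (objective: alternative).

-- ===== PORT A =====
-- the loop over range(len-1, -1, -1) with break: recursion over the index list, early exit on non-zero
def pvALoop (possibilities : List Int) : List Int → Int → Int
  | [], acc => acc
  | i :: rest, acc =>
    match PySem.List.pyGet? possibilities i with
    | none => acc  -- unreachable: every i comes from range(len-1, -1, -1), hence in range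
    | some v => if v == 0 then pvALoop possibilities rest i else acc

def get_last_zero_index (possibilities : List Int) : Int :=
  pvALoop possibilities
    (PySem.List.pyRange ((possibilities.length : Int) - 1) (-1) (-1))
    (possibilities.length : Int)

-- ===== PORT B =====
def get_last_zero_index_alt (possibilities : List Int) : Int :=
  (PySem.List.enumerate possibilities 0).foldl
    (fun start iv => if iv.2 ≠ 0 then iv.1 + 1 else start) 0

-- ===== PRECONDITION & SPEC =====
def Spec_get_last_zero_index (possibilities : List Int) (out : Int) : Prop := out = get_last_zero_index_alt possibilities
instance (possibilities : List Int) (out : Int) : Decidable (Spec_get_last_zero_index possibilities out) := by unfold Spec_get_last_zero_index; infer_instance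

-- ===== CLAIM (what is proved, stated in full; the proofs are below) =====
def Claim_equal_get_last_zero_index : Prop := ∀ (possibilities : List Int), Dom_get_last_zero_index possibilities → Spec_get_last_zero_index possibilities (get_last_zero_index possibilities)

-- ===== LEMMAS AND PROOFS =====

-- A's loop only inspects indices inside l, so the extra last element is invisible to it
theorem pvALoop_append (l : List Int) (x : Int) (idxs : List Int) (acc : Int)
    (h : ∀ i ∈ idxs, 0 ≤ i ∧ i < (l.length : Int)) :
    pvALoop (l ++ [x]) idxs acc = pvALoop l idxs acc := by
  induction idxs generalizing acc with
  | nil => rfl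
  | cons i rest ih =>
    obtain ⟨h0, hlt⟩ := h i (List.mem_cons_self ..)
    have hget : PySem.List.pyGet? (l ++ [x]) i = PySem.List.pyGet? l i := by
      rw [PySem.List.pyGet?_of_nonneg (l ++ [x]) h0, PySem.List.pyGet?_of_nonneg l h0,
        List.getElem?_append_left (by omega)]
    simp only [pvALoop, hget]
    cases PySem.List.pyGet? l i with
    | none => rfl
    | some v =>
      have hrec := ih i (fun j hj => h j (List.mem_cons_of_mem _ hj))
      by_cases hv : v = 0 <;> simp [hv, hrec]

theorem portA_append (l : List Int) (x : Int) :
    get_last_zero_index (l ++ [x]) =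
      if x ≠ 0 then (l.length : Int) + 1 else get_last_zero_index l := by
  unfold get_last_zero_index
  have hlen : ((l ++ [x]).length : Int) = (l.length : Int) + 1 := by simp
  rw [hlen]
  have hcons : PySem.List.pyRange ((l.length : Int)) (-1) (-1) =
      (l.length : Int) :: PySem.List.pyRange ((l.length : Int) - 1) (-1) (-1) := by
    have := PySem.List.pyRange_neg_one_cons (a := (l.length : Int)) (b := (-1)) (by omega)
    simp only [this]
  rw [show ((l.length : Int) + 1 - 1) = (l.length : Int) by ring, hcons]
  simp only [pvALoop]
  have hget : PySem.List.pyGet? (l ++ [x]) (l.length : Int) = some x := by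
    exact PySem.List.pyGet?_append_length l [] x
  rw [hget]
  by_cases hx : x = 0
  · subst hx
    simp only [BEq.rfl, if_true, ne_eq, not_true_eq_false, if_false]
    exact pvALoop_append l 0 (PySem.List.pyRange ((l.length : Int) - 1) (-1) (-1)) _
      (fun i hi => by
        have := (PySem.List.mem_pyRange_neg_one).1 hi
        omega)
  · simp [hx]

theorem portB_append (l : List Int) (x : Int) :
    get_last_zero_index_alt (l ++ [x]) =
      if x ≠ 0 then (l.length : Int) + 1 else get_last_zero_index_alt l := by
  unfold get_last_zero_index_alt
  rw [PySem.List.enumerate_append, List.foldl_append]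
  simp [PySem.List.enumerate]

theorem ports_agree (l : List Int) : get_last_zero_index l = get_last_zero_index_alt l := by
  induction l using List.reverseRecOn with
  | nil => rfl
  | append_singleton l x ih => rw [portA_append, portB_append, ih]

-- ===== VERDICT (by name: the statement is the Claim_ definition above) =====
theorem get_last_zero_index_spec : Claim_equal_get_last_zero_index := by
  intro l _
  unfold Spec_get_last_zero_index
  exact ports_agree l
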